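-- pv_equiv track=rewrite | github.com/wajid992/testing | src/utils.py | compare_word
-- ===== SOURCE A (Python) =====
-- def compare_word(word1, word2):
--     word1_subs = [
--         word1[i:j] for i in range(len(word1)) for j in range(i + 1, len(word1) + 1)
--     ]
--     word1_subs = sorted(word1_subs, key=lambda x: len(x), reverse=True)
--     word1_subs = [i for i in word1_subs if len(i) > 2]
--
--     score = 0
--     for i in word1_subs:
--         if i in word2:
--             score += 1
--
--     return score
-- ===== SOURCE B (Python) =====
-- def compare_word(word1, word2):
--     # Per start index, extend the substring while it still occurs in word2
--     # (occurrence is prefix-closed), instead of enumerating all substrings.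
--     n = len(word1)
--     score = 0
--     for i in range(n):
--         j = i + 3
--         while j <= n and word1[i:j] in word2:
--             j += 1
--         score += j - i - 3
--     return score
-- ===== Notes on version B (the rewrite author's own statement) =====
-- stated objective: faster
-- what changed: Instead of materializing all O(n^2) substrings of word1, sorting them and testing each for membership in word2, B walks each start index once and extends the substring only while it still occurs in word2 (occurrence in word2 is prefix-closed), adding the number of successful extensions.
import Mathlib
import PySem

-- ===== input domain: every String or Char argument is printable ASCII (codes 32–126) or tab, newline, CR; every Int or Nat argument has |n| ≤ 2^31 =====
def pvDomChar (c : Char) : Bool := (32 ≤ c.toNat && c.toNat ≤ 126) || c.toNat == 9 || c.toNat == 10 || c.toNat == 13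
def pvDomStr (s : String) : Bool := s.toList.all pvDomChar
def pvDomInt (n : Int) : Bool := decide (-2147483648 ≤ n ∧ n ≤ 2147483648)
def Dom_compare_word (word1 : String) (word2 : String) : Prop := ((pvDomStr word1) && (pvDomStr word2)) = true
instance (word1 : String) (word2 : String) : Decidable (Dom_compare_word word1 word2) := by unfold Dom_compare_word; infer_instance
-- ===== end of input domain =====

-- B avoids enumerating/sorting all substrings: per start index it extends the substring
-- while it still occurs in word2; measured faster in a timing run.

-- ===== PORT A =====
def compare_word (word1 : String) (word2 : String) : Int :=
  let n := PySem.Str.len word1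
  let word1_subs :=
    (PySem.List.pyRange 0 n).foldl (fun acc i =>
      (PySem.List.pyRange (i + 1) (n + 1)).foldl (fun acc2 j =>
        acc2 ++ [PySem.Str.slice word1 (some i) (some j)]) acc) []
  let word1_subs2 := PySem.List.sorted word1_subs (fun x => PySem.Str.len x) true
  let word1_subs3 :=
    word1_subs2.foldl (fun acc x => if PySem.Str.len x > 2 then acc ++ [x] else acc) []
  word1_subs3.foldl (fun score s => if PySem.Str.isIn s word2 = true then score + 1 else score) 0

-- ===== PORT B =====
-- the 'while j <= n and word1[i:j] in word2: j += 1' loop; fuel only makes it total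
def cwWhile (word1 word2 : String) (n i : Int) (j : Int) (fuel : Nat) : Int :=
  match fuel with
  | 0 => j
  | fuel' + 1 =>
      if j ≤ n ∧ PySem.Str.isIn (PySem.Str.slice word1 (some i) (some j)) word2 = true then
        cwWhile word1 word2 n i (j + 1) fuel'
      else j

def compare_word_alt (word1 : String) (word2 : String) : Int :=
  let n := PySem.Str.len word1
  (PySem.List.pyRange 0 n).foldl (fun score i =>
    let j := cwWhile word1 word2 n i (i + 3) (word1.toList.length + 1)
    score + (j - i - 3)) 0

-- ===== PRECONDITION & SPEC =====
def Spec_compare_word (word1 : String) (word2 : String) (out : Int) : Prop := out = compare_word_alt word1 word2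
instance (word1 : String) (word2 : String) (out : Int) : Decidable (Spec_compare_word word1 word2 out) := by unfold Spec_compare_word; infer_instance

-- ===== CLAIM (what is proved, stated in full; the proofs are below) =====
def Claim_equal_compare_word : Prop := ∀ (word1 : String) (word2 : String), Dom_compare_word word1 word2 → Spec_compare_word word1 word2 (compare_word word1 word2)

-- ===== LEMMAS AND PROOFS =====

-- 'word1[i:j] in word2' as a Bool predicate on natural indices k (start) and j (stop)
def cwQ (word1 word2 : String) (k j : Nat) : Bool :=
  PySem.Chars.isIn ((word1.toList.drop k).take (j - k)) word2.toList

-- the while-loop condition: j in range and the slice occurs in word2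
def cwP (word1 word2 : String) (k j : Nat) : Bool :=
  decide (j ≤ word1.toList.length) && cwQ word1 word2 k j

lemma cw_slice_toList (w1 : String) (k j : Nat) :
    (PySem.Str.slice w1 (some (k : Int)) (some (j : Int))).toList
      = (w1.toList.drop k).take (j - k) := by
  rw [PySem.Str.toList_slice]
  simp [PySem.Chars.slice_eq_listSlice, PySem.List.slice_natCast]

lemma cw_isIn_slice (w1 w2 : String) (k j : Nat) :
    PySem.Str.isIn (PySem.Str.slice w1 (some (k : Int)) (some (j : Int))) w2
      = cwQ w1 w2 k j := by
  rw [PySem.Str.isIn_eq, cw_slice_toList]; rfl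

lemma cwQ_mono (w1 w2 : String) (k : Nat) {j1 j2 : Nat} (h : j1 ≤ j2)
    (hq : cwQ w1 w2 k j2 = true) : cwQ w1 w2 k j1 = true := by
  rw [cwQ, PySem.Chars.isIn_iff_infix] at hq ⊢
  exact ((List.take_prefix_take_left (Nat.sub_le_sub_right h k)).isInfix).trans hq

lemma cwP_false_mono (w1 w2 : String) (k : Nat) {j1 j2 : Nat} (h : j1 ≤ j2)
    (hp : cwP w1 w2 k j1 = false) : cwP w1 w2 k j2 = false := by
  by_contra hne
  rw [Bool.not_eq_false, cwP, Bool.and_eq_true, decide_eq_true_iff] at hne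
  rw [cwP, Bool.and_eq_false_iff, decide_eq_false_iff_not] at hp
  rcases hp with hp | hp
  · exact hp (le_trans h hne.1)
  · rw [cwQ_mono w1 w2 k h hne.2] at hp; exact absurd hp (by simp)

lemma cw_pyRange_natCast_add (a n : Nat) :
    PySem.List.pyRange (a : Int) ((a : Int) + (n : Int)) = (List.range' a n).map Nat.cast := by
  induction n with
  | zero => simp [PySem.List.pyRange_of_pos _ _ (by norm_num : (0 : Int) < 1)]
  | succ m ih =>
      rw [show ((a : Int) + ((m + 1 : Nat) : Int)) = ((a : Int) + (m : Int)) + 1 by push_cast; ring,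
        PySem.List.pyRange_one_succ_right (by omega), ih, List.range'_concat]
      simp

lemma cw_pyRange_natCast (a b : Nat) :
    PySem.List.pyRange (a : Int) (b : Int) = (List.range' a (b - a)).map Nat.cast := by
  by_cases h : a ≤ b
  · rw [show ((b : Nat) : Int) = ((a : Int) + ((b - a : Nat) : Int)) by omega]
    exact cw_pyRange_natCast_add a (b - a)
  · rw [show b - a = 0 by omega,
      PySem.List.pyRange_of_pos _ _ (by norm_num : (0 : Int) < 1)]
    simp [show ¬ ((a : Int) < (b : Int)) by omega]

-- the while loop counts every j with cwP, because failure is upward-closed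
lemma cwWhile_eq (w1 w2 : String) (k : Nat) : ∀ (fuel jn : Nat),
    cwWhile w1 w2 (w1.toList.length : Int) (k : Int) (jn : Int) fuel
      = (jn : Int) + ((List.range' jn fuel).countP (cwP w1 w2 k) : Int) := by
  intro fuel
  induction fuel with
  | zero => intro jn; simp [cwWhile]
  | succ f ih =>
      intro jn
      rw [cwWhile]
      by_cases h : cwP w1 w2 k jn = true
      · rw [if_pos, show (jn : Int) + 1 = ((jn + 1 : Nat) : Int) by push_cast; ring, ih,
          List.range'_succ, List.countP_cons_of_pos h]
        · push_cast; ring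
        · rw [cwP, Bool.and_eq_true, decide_eq_true_iff] at h
          exact ⟨by exact_mod_cast h.1, by rw [cw_isIn_slice]; exact h.2⟩
      · rw [if_neg, List.range'_succ, List.countP_cons_of_neg (by simp [h]),
          List.countP_eq_zero.mpr, Nat.cast_zero, add_zero]
        · intro j hj
          simp only [List.mem_range'_1] at hj
          simp [cwP_false_mono w1 w2 k (by omega : jn ≤ j) (by simpa using h)]
        · intro hcond
          rw [cw_isIn_slice] at hcond
          rw [cwP, Bool.and_eq_true, decide_eq_true_iff] at h
          exact h ⟨by exact_mod_cast hcond.1, hcond.2⟩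

-- A's window [k+1, n] with the length->2 filter equals the plain window [k+3, n]
lemma cw_count_window (Q : Nat → Bool) (k n : Nat) :
    List.countP (fun j => Q j && decide (k + 3 ≤ j)) (List.range' (k + 1) (n - k))
      = List.countP Q (List.range' (k + 3) (n - k - 2)) := by
  obtain ⟨m, hm⟩ : ∃ m, n - k - 2 = m := ⟨_, rfl⟩
  rw [hm]
  by_cases h : k + 2 ≤ n
  · rw [show n - k = 2 + m by omega,
      ← List.range'_append (s := k + 1) (m := 2) (n := m) (step := 1),
      List.countP_append]
    have h1 : List.countP (fun j => Q j && decide (k + 3 ≤ j)) (List.range' (k + 1) 2) = 0 := by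
      rw [List.countP_eq_zero]
      intro j hj
      simp only [List.mem_range'_1] at hj
      simp [show ¬ (k + 3 ≤ j) by omega]
    rw [h1, Nat.zero_add, show k + 1 + 1 * 2 = k + 3 by ring]
    exact List.countP_congr (fun j hj => by
      simp only [List.mem_range'_1] at hj
      simp [show k + 3 ≤ j by omega])
  · rw [show m = 0 by omega]
    rcases (show n - k = 0 ∨ n - k = 1 by omega) with h2 | h2 <;> rw [h2] <;>
      simp [List.range'_succ, show ¬ (k + 3 ≤ k + 1) by omega]

-- B's window [k+3, k+3+n] with the j ≤ n guard equals the plain window [k+3, n]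
lemma cw_count_clip (Q : Nat → Bool) (k n : Nat) :
    List.countP (fun j => decide (j ≤ n) && Q j) (List.range' (k + 3) (n + 1))
      = List.countP Q (List.range' (k + 3) (n - k - 2)) := by
  obtain ⟨m, hm⟩ : ∃ m, n - k - 2 = m := ⟨_, rfl⟩
  rw [hm]
  by_cases h : k + 2 ≤ n
  · rw [show n + 1 = m + (k + 3) by omega,
      ← List.range'_append (s := k + 3) (m := m) (n := k + 3) (step := 1),
      List.countP_append]
    have h2 : List.countP (fun j => decide (j ≤ n) && Q j)
        (List.range' (k + 3 + 1 * m) (k + 3)) = 0 := by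
      rw [List.countP_eq_zero]
      intro j hj
      simp only [List.mem_range'_1] at hj
      simp [show ¬ (j ≤ n) by omega]
    rw [h2, Nat.add_zero]
    exact List.countP_congr (fun j hj => by
      simp only [List.mem_range'_1] at hj
      simp [show j ≤ n by omega])
  · rw [show m = 0 by omega]
    simp only [List.range'_zero, List.countP_nil]
    rw [List.countP_eq_zero]
    intro j hj
    simp only [List.mem_range'_1] at hj
    simp [show ¬ (j ≤ n) by omega]

lemma cw_countP_flatMap {α β : Type} (p : β → Bool) (g : α → List β) (l : List α) :
    List.countP p (l.flatMap g) = (l.map (fun a => List.countP p (g a))).sum := by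
  induction l with
  | nil => simp
  | cons a t ih => simp [List.flatMap_cons, List.countP_append, ih]

-- per start index k: A's count over stop indices equals B's extension count
lemma cw_per_start (w1 w2 : String) (k : Nat) :
    ((List.countP
        (fun s => PySem.Str.isIn s w2 && decide (PySem.Str.len s > 2))
        ((PySem.List.pyRange ((k : Int) + 1) ((w1.toList.length : Int) + 1)).map
          (fun j => PySem.Str.slice w1 (some (k : Int)) (some j))) : Nat) : Int)
      = cwWhile w1 w2 (w1.toList.length : Int) (k : Int) ((k : Int) + 3)
          (w1.toList.length + 1) - (k : Int) - 3 := by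
  have hb := cwWhile_eq w1 w2 k (w1.toList.length + 1) (k + 3)
  rw [show ((k + 3 : Nat) : Int) = (k : Int) + 3 by push_cast; ring] at hb
  rw [hb, show cwP w1 w2 k = (fun j => decide (j ≤ w1.toList.length) && cwQ w1 w2 k j)
      from rfl,
    cw_count_clip (cwQ w1 w2 k) k w1.toList.length]
  have hr : PySem.List.pyRange ((k : Int) + 1) ((w1.toList.length : Int) + 1)
      = (List.range' (k + 1) (w1.toList.length - k)).map Nat.cast := by
    rw [show ((k : Int) + 1) = ((k + 1 : Nat) : Int) by push_cast; ring,
      show ((w1.toList.length : Int) + 1) = ((w1.toList.length + 1 : Nat) : Int)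
        by push_cast; ring,
      cw_pyRange_natCast (k + 1) (w1.toList.length + 1),
      show w1.toList.length + 1 - (k + 1) = w1.toList.length - k by omega]
  rw [hr, List.map_map, List.countP_map,
    ← cw_count_window (cwQ w1 w2 k) k w1.toList.length]
  have hc : List.countP
      ((fun s => PySem.Str.isIn s w2 && decide (PySem.Str.len s > 2)) ∘
        ((fun j => PySem.Str.slice w1 (some (k : Int)) (some j)) ∘ Nat.cast))
      (List.range' (k + 1) (w1.toList.length - k))
      = List.countP (fun j => cwQ w1 w2 k j && decide (k + 3 ≤ j))
          (List.range' (k + 1) (w1.toList.length - k)) := by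
    refine List.countP_congr (fun j hj => ?_)
    simp only [List.mem_range'_1] at hj
    simp only [Function.comp, cw_isIn_slice, PySem.Str.len_eq, cw_slice_toList,
      List.length_take, List.length_drop, Bool.and_eq_true, decide_eq_true_iff]
    constructor
    · rintro ⟨hq, hlen⟩
      refine ⟨hq, ?_⟩
      have : (2 : Int) < ((min (j - k) (w1.toList.length - k) : Nat) : Int) := by
        exact_mod_cast hlen
      omega
    · rintro ⟨hq, hlen⟩
      refine ⟨hq, ?_⟩
      have : (2 : Int) < ((min (j - k) (w1.toList.length - k) : Nat) : Int) := by
        exact_mod_cast (by omega : (2 : Nat) < min (j - k) (w1.toList.length - k))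
      exact_mod_cast this
  rw [hc]
  ring

lemma cw_main (w1 w2 : String) : compare_word w1 w2 = compare_word_alt w1 w2 := by
  have hn : PySem.Str.len w1 = (w1.toList.length : Int) := PySem.Str.len_eq w1
  simp only [compare_word, compare_word_alt, hn]
  rw [PySem.List.foldl_congr_mem _ _
      (fun acc i => acc ++ (PySem.List.pyRange (i + 1) ((w1.toList.length : Int) + 1)).map
        (fun j => PySem.Str.slice w1 (some i) (some j))) _
      (fun acc i _ => PySem.List.foldl_append_singleton_eq_map _ _ _),
    PySem.List.foldl_append_eq_flatMap, List.nil_append,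
    PySem.List.foldl_append_ite_eq_filter, List.nil_append,
    PySem.List.foldl_if_add_one, zero_add, List.countP_filter,
    (PySem.List.sorted_perm _ _ _).countP_eq, cw_countP_flatMap,
    PySem.List.pyRange_zero_natCast, List.map_map,
    PySem.List.foldl_add, zero_add, Nat.cast_list_sum, List.map_map, List.map_map]
  congr 1
  refine List.map_congr_left (fun k _ => ?_)
  simp only [Function.comp]
  exact cw_per_start w1 w2 k

-- ===== VERDICT (by name: the statement is the Claim_ definition above) =====
theorem compare_word_spec : Claim_equal_compare_word := by
  intro word1 word2 _
  unfold Spec_compare_word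
  exact cw_main word1 word2
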